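-- pv_equiv track=rewrite | github.com/Romaronio/Study-EGE-2024-2025 | егэ по информатике/Ромаронио/Умскул/пробник №6/25.py | Del
-- ===== SOURCE A (Python) =====
-- def Del(s):
--   mas = set()
--   for i in range(2, int(s ** 0.5) + 1):
--     if s % i == 0:
--       mas.add(i)
--       mas.add(s // i)
--   mas = sorted(mas)
--   if mas:
--     return max(mas) - min(mas)
--   else:
--     return None
-- ===== SOURCE B (Python) =====
-- def Del(s):
--   # single early-breaking pass: the first divisor p in [2, isqrt(s)] is the
--   # smallest proper divisor, and s // p is the largest, so the answer is s//p - p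
--   for i in range(2, int(s ** 0.5) + 1):
--     if s % i == 0:
--       return s // i - i
--   return None
-- ===== Notes on version B (the rewrite author's own statement) =====
-- stated objective: simpler
-- what changed: B replaces A's build-a-set-of-all-divisor-pairs / sort / max-min pipeline by a single early-breaking scan that stops at the first divisor p and returns s//p - p directly (no set, no sort, no min/max pass); Pre_ excludes negative inputs, where both programs raise TypeError because the Python square root is complex.
import Mathlib
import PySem

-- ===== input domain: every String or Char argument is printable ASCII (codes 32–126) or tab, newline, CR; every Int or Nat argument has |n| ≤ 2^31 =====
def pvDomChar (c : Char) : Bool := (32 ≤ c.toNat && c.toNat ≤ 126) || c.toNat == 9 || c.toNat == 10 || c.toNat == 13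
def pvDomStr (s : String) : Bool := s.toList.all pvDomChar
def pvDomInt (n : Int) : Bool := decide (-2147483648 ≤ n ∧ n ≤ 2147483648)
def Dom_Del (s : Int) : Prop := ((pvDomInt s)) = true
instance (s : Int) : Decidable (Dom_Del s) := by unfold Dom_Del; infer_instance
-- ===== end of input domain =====

-- B replaces A's set/sort/max-min pipeline by one early-breaking scan returning s//p - p
-- at the first divisor p; objective: simpler.
-- int(s**0.5) is exactly Int.sqrt s for 0 ≤ s ≤ 2^31 (double sqrt is exact there); negative s
-- raise TypeError in Python (complex ** result), excluded by Pre_Del.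

-- ===== PORT A =====
def Del (s : Int) : Option Int :=
  let mas : PySem.Set Int :=
    (PySem.List.pyRange 2 (Int.sqrt s + 1) 1).foldl
      (fun m i =>
        if PySem.Int.mod s i = 0 then
          PySem.Set.add (PySem.Set.add m i) (PySem.Int.floordiv s i)
        else m)
      PySem.Set.empty
  let masS := PySem.List.sorted mas (fun x => x) false
  if masS ≠ [] then
    match PySem.List.max? masS (fun x => x), PySem.List.min? masS (fun x => x) with
    | some M, some m => some (M - m)
    | _, _ => none          -- unreachable: masS ≠ []
  else
    none

-- ===== PORT B =====
def delAltLoop (s : Int) : List Int → Option Int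
  | [] => none
  | i :: rest =>
      if PySem.Int.mod s i = 0 then some (PySem.Int.floordiv s i - i)
      else delAltLoop s rest

def Del_alt (s : Int) : Option Int :=
  delAltLoop s (PySem.List.pyRange 2 (Int.sqrt s + 1) 1)

-- ===== PRECONDITION & SPEC =====
-- Pre_ excludes negative inputs: there Python's s ** 0.5 is complex and int() raises TypeError (in both A and B).
def Pre_Del (s : Int) : Prop := 0 ≤ s
instance (s : Int) : Decidable (Pre_Del s) := by unfold Pre_Del; infer_instance
def pvWitness_Del : Int := (12)

def Spec_Del (s : Int) (out : Option Int) : Prop := out = Del_alt s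
instance (s : Int) (out : Option Int) : Decidable (Spec_Del s out) := by unfold Spec_Del; infer_instance

-- ===== CLAIM (what is proved, stated in full; the proofs are below) =====
def Claim_equal_Del : Prop := ∀ (s : Int), Dom_Del s → Pre_Del s → Spec_Del s (Del s)

-- ===== LEMMAS AND PROOFS =====

-- membership in the divisor set A builds by folding over l
lemma mem_delFold (s : Int) (l : List Int) (acc : PySem.Set Int) (x : Int) :
    x ∈ l.foldl
      (fun m i =>
        if PySem.Int.mod s i = 0 then
          PySem.Set.add (PySem.Set.add m i) (PySem.Int.floordiv s i)
        else m) acc ↔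
    x ∈ acc ∨ ∃ i ∈ l, PySem.Int.mod s i = 0 ∧ (x = i ∨ x = PySem.Int.floordiv s i) := by
  induction l generalizing acc with
  | nil => simp
  | cons a t ih =>
      simp only [List.foldl_cons, ih, List.mem_cons]
      split_ifs with h
      · simp only [PySem.Set.mem_add]
        constructor
        · rintro (((hx | hx) | hx) | ⟨i, hi, hd, hx⟩)
          · exact Or.inl hx
          · exact Or.inr ⟨a, Or.inl rfl, h, Or.inl hx⟩
          · exact Or.inr ⟨a, Or.inl rfl, h, Or.inr hx⟩
          · exact Or.inr ⟨i, Or.inr hi, hd, hx⟩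
        · rintro (hx | ⟨i, (rfl | hi), hd, hx⟩)
          · exact Or.inl (Or.inl (Or.inl hx))
          · rcases hx with hx | hx
            · exact Or.inl (Or.inl (Or.inr hx))
            · exact Or.inl (Or.inr hx)
          · exact Or.inr ⟨i, hi, hd, hx⟩
      · constructor
        · rintro (hx | ⟨i, hi, hd, hx⟩)
          · exact Or.inl hx
          · exact Or.inr ⟨i, Or.inr hi, hd, hx⟩
        · rintro (hx | ⟨i, (rfl | hi), hd, hx⟩)
          · exact Or.inl hx
          · exact absurd hd h
          · exact Or.inr ⟨i, hi, hd, hx⟩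

lemma delAltLoop_eq_none (s : Int) (l : List Int) :
    delAltLoop s l = none ↔ ∀ i ∈ l, PySem.Int.mod s i ≠ 0 := by
  induction l with
  | nil => simp [delAltLoop]
  | cons a t ih =>
      simp only [delAltLoop, List.mem_cons]
      split_ifs with h
      · constructor
        · intro hf; exact absurd hf (by simp)
        · intro hf; exact absurd h (hf a (Or.inl rfl))
      · rw [ih]
        constructor
        · rintro hf i (rfl | hi)
          · exact h
          · exact hf i hi
        · exact fun hf i hi => hf i (Or.inr hi)

lemma delAltLoop_eq_some (s : Int) (l : List Int) (hl : l.Pairwise (· < ·)) (v : Int)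
    (h : delAltLoop s l = some v) :
    ∃ p ∈ l, PySem.Int.mod s p = 0 ∧ v = PySem.Int.floordiv s p - p ∧
      ∀ j ∈ l, PySem.Int.mod s j = 0 → p ≤ j := by
  induction l with
  | nil => simp [delAltLoop] at h
  | cons a t ih =>
      simp only [delAltLoop] at h
      split_ifs at h with hd
      · refine ⟨a, List.mem_cons_self, hd, ((Option.some.injEq _ _).mp h).symm, ?_⟩
        intro j hj _
        rcases List.mem_cons.mp hj with rfl | hj'
        · exact le_refl j
        · exact le_of_lt ((List.pairwise_cons.mp hl).1 j hj')
      · obtain ⟨p, hp, hpd, hv, hmin⟩ := ih (List.pairwise_cons.mp hl).2 h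
        refine ⟨p, List.mem_cons_of_mem a hp, hpd, hv, ?_⟩
        intro j hj hjd
        rcases List.mem_cons.mp hj with rfl | hj'
        · exact absurd hjd hd
        · exact hmin j hj' hjd

-- i ≤ Int.sqrt s implies i * i ≤ s (for 0 ≤ s, 0 ≤ i)
lemma sq_le_of_le_sqrt {s i : Int} (hs : 0 ≤ s) (hi : 0 ≤ i) (h : i ≤ Int.sqrt s) :
    i * i ≤ s := by
  obtain ⟨n, rfl⟩ := Int.eq_ofNat_of_zero_le hs
  obtain ⟨m, rfl⟩ := Int.eq_ofNat_of_zero_le hi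
  rw [Int.sqrt_natCast] at h
  exact_mod_cast Nat.le_sqrt.mp (by exact_mod_cast h)

-- divisor bounds
lemma div_self_le {s i : Int} (hi : 0 < i) (hsq : i * i ≤ s) : i ≤ PySem.Int.floordiv s i := by
  rw [PySem.Int.floordiv_eq_ediv_of_pos hi]
  exact Int.le_ediv_iff_mul_le hi |>.mpr hsq

lemma div_antitone {s p i : Int} (hs : 0 ≤ s) (hp : 0 < p) (hpi : p ≤ i)
    (hdp : p ∣ s) (hdi : i ∣ s) : PySem.Int.floordiv s i ≤ PySem.Int.floordiv s p := by
  have hi : 0 < i := lt_of_lt_of_le hp hpi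
  rw [PySem.Int.floordiv_eq_ediv_of_pos hi, PySem.Int.floordiv_eq_ediv_of_pos hp]
  have hep : s / p * p = s := Int.ediv_mul_cancel hdp
  have hei : s / i * i = s := Int.ediv_mul_cancel hdi
  have hqi : 0 ≤ s / i := Int.ediv_nonneg hs (le_of_lt hi)
  have : s / i * p ≤ s / p * p := by
    calc s / i * p ≤ s / i * i := by exact mul_le_mul_of_nonneg_left hpi hqi
    _ = s := hei
    _ = s / p * p := hep.symm
  exact le_of_mul_le_mul_right this hp

theorem Del_eq_alt (s : Int) (hs : Pre_Del s) : Del s = Del_alt s := by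
  have hs' : (0:Int) ≤ s := hs
  unfold Del Del_alt
  set L := PySem.List.pyRange 2 (Int.sqrt s + 1) 1 with hL
  set mas := L.foldl
      (fun m i =>
        if PySem.Int.mod s i = 0 then
          PySem.Set.add (PySem.Set.add m i) (PySem.Int.floordiv s i)
        else m) PySem.Set.empty with hmas
  have hmem : ∀ x, x ∈ mas ↔ ∃ i ∈ L, PySem.Int.mod s i = 0 ∧
      (x = i ∨ x = PySem.Int.floordiv s i) := by
    intro x
    rw [hmas, mem_delFold]
    simp [PySem.Set.empty]
  -- facts about members of L
  have hLmem : ∀ i, i ∈ L → 2 ≤ i ∧ i * i ≤ s := by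
    intro i hi
    rw [hL, PySem.List.mem_pyRange_one] at hi
    exact ⟨hi.1, sq_le_of_le_sqrt hs' (by omega) (by omega)⟩
  cases hAlt : delAltLoop s L with
  | none =>
      have hnd := (delAltLoop_eq_none s L).mp hAlt
      have : mas = [] := by
        apply List.eq_nil_iff_forall_not_mem.mpr
        intro x hx
        obtain ⟨i, hi, hd, _⟩ := (hmem x).mp hx
        exact hnd i hi hd
      simp [this, PySem.List.sorted_eq_nil_iff]
  | some v =>
      obtain ⟨p, hpL, hpd, hv, hmin⟩ :=
        delAltLoop_eq_some s L (hL ▸ PySem.List.pairwise_lt_pyRange_one 2 (Int.sqrt s + 1)) v hAlt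
      have hp2 : 2 ≤ p := (hLmem p hpL).1
      have hppos : 0 < p := by omega
      have hpdvd : p ∣ s := (PySem.Int.mod_eq_zero_iff_dvd s p).mp hpd
      -- the set contains p and s // p, and every member x satisfies p ≤ x ≤ s // p
      have hpmem : p ∈ mas := (hmem p).mpr ⟨p, hpL, hpd, Or.inl rfl⟩
      have hqmem : PySem.Int.floordiv s p ∈ mas :=
        (hmem _).mpr ⟨p, hpL, hpd, Or.inr rfl⟩
      have hbound : ∀ x ∈ mas, p ≤ x ∧ x ≤ PySem.Int.floordiv s p := by
        intro x hx
        obtain ⟨i, hiL, hid, hxi⟩ := (hmem x).mp hx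
        obtain ⟨hi2, hisq⟩ := hLmem i hiL
        have hipos : 0 < i := by omega
        have hidvd : i ∣ s := (PySem.Int.mod_eq_zero_iff_dvd s i).mp hid
        have hpi : p ≤ i := hmin i hiL hid
        have hii : i ≤ PySem.Int.floordiv s i := div_self_le hipos hisq
        have hanti : PySem.Int.floordiv s i ≤ PySem.Int.floordiv s p :=
          div_antitone hs' hppos hpi hpdvd hidvd
        rcases hxi with rfl | rfl
        · exact ⟨hpi, le_trans hii hanti⟩
        · exact ⟨le_trans hpi hii, hanti⟩
      set masS := PySem.List.sorted mas (fun x => x) false with hmasS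
      have hpS : p ∈ masS := (PySem.List.mem_sorted _ _ _ _).mpr hpmem
      have hqS : PySem.Int.floordiv s p ∈ masS := (PySem.List.mem_sorted _ _ _ _).mpr hqmem
      have hne : masS ≠ [] := fun h => by simp [h] at hpS
      have hboundS : ∀ x ∈ masS, p ≤ x ∧ x ≤ PySem.Int.floordiv s p := by
        intro x hx; exact hbound x ((PySem.List.mem_sorted _ _ _ _).mp hx)
      -- max? and min? of masS
      obtain ⟨M, hM⟩ : ∃ M, PySem.List.max? masS (fun x => x) = some M := by
        cases h : PySem.List.max? masS (fun x => x) with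
        | none => exact absurd ((PySem.List.max?_eq_none_iff _ _).mp h) hne
        | some M => exact ⟨M, rfl⟩
      obtain ⟨m, hm⟩ : ∃ m, PySem.List.min? masS (fun x => x) = some m := by
        cases h : PySem.List.min? masS (fun x => x) with
        | none => exact absurd ((PySem.List.min?_eq_none_iff _ _).mp h) hne
        | some m => exact ⟨m, rfl⟩
      have hMval : M = PySem.Int.floordiv s p := by
        have h1 : M ≤ PySem.Int.floordiv s p :=
          (hboundS M (PySem.List.max?_mem hM)).2
        have h2 : PySem.Int.floordiv s p ≤ M := PySem.List.max?_isMax hM _ hqS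
        omega
      have hmval : m = p := by
        have h1 : p ≤ m := (hboundS m (PySem.List.min?_mem hm)).1
        have h2 : m ≤ p := PySem.List.min?_isMin hm _ hpS
        omega
      rw [if_pos hne, hM, hm, hMval, hmval, hv]

-- ===== VERDICT (by name: the statement is the Claim_ definition above) =====
theorem Del_spec : Claim_equal_Del := by
  intro s _ hpre
  unfold Spec_Del
  exact Del_eq_alt s hpre
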